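-- pv_equiv track=rewrite | github.com/hanjungwoo1/CodingTest | test.py | mark
-- ===== SOURCE A (Python) =====
-- def mark(graph, x, y, N, M, Direction):
--     if x < 0 or N <= x:
--         return graph
--
--     if y < 0 or M <= y:
--         return graph
--
--     if graph[x][y] in ['X', '<', '>', '^', 'v']:
--         return graph
--
--     graph[x][y] = 'o'
--
--     if Direction == "right":
--         mark(graph, x, y+1, N, M, "right")
--
--     if Direction == "left":
--         mark(graph, x, y-1, N, M, "left")
--
--     if Direction == "down":
--         mark(graph, x+1, y, N, M, "down")
--
--     if Direction == "up":
--         mark(graph, x-1, y, N, M, "up")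
--
--     return graph
-- ===== SOURCE B (Python) =====
-- def mark(graph, x, y, N, M, Direction):
--     # Iterative re-implementation: step vector from a direction table, one while loop.
--     # Mutates graph in place, exactly as A does.
--     step = {"right": (0, 1), "left": (0, -1), "down": (1, 0), "up": (-1, 0)}.get(Direction)
--     obstacles = {'X', '<', '>', '^', 'v'}
--     while 0 <= x < N and 0 <= y < M and graph[x][y] not in obstacles:
--         graph[x][y] = 'o'
--         if step is None:
--             break
--         x += step[0]
--         y += step[1]
--     return graph
-- ===== Notes on version B (the rewrite author's own statement) =====
-- stated objective: simpler
-- what changed: Replaces A's four-way string-dispatched recursion (one recursive call per direction, re-checking the direction string at every cell) with a single iterative while-loop driven by a (dx,dy) step vector looked up once in a direction table.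
-- outside the precondition, e.g. on mark([['X']], 0, 0, 5, 5, 'right'): A returns [['X']], B returns [['X']]
import Mathlib
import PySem

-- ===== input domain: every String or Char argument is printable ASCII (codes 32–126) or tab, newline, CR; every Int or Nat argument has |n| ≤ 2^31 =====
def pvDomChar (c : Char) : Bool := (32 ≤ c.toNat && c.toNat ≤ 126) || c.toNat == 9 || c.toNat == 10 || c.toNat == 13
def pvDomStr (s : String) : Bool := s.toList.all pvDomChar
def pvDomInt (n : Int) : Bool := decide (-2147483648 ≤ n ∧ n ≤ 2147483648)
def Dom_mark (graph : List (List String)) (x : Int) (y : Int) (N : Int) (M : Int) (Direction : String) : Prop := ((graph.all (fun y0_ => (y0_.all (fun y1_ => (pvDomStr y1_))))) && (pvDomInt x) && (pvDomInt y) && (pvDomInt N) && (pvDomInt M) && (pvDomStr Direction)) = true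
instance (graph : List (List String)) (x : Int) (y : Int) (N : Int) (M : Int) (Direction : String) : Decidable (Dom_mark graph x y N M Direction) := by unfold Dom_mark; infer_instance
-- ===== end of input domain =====

-- B replaces A's four-way string-dispatched recursion by one iterative walk driven by a
-- step vector looked up in a direction table (objective: simpler). Both A and B mutate
-- `graph` in place in Python identically; the ports are the functional return values.


-- ===== PORT A =====
-- set graph[x][y] = 'o' (only used under 0 ≤ x < len, 0 ≤ y < row length, where toNat is exact)
def markSet (graph : List (List String)) (x y : Int) : List (List String) :=
  graph.set x.toNat (((PySem.List.pyGet? graph x).getD []).set y.toNat "o")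

-- literal recursion of A; fuel only makes the recursion total (depth ≤ |x|+|y|+|N|+|M|+1)
def markAux (fuel : Nat) (graph : List (List String)) (x y N M : Int) (Direction : String) : List (List String) :=
  match fuel with
  | 0 => graph
  | Nat.succ f =>
    if x < 0 ∨ N ≤ x then graph
    else if y < 0 ∨ M ≤ y then graph
    else
      let cell := (PySem.List.pyGet? ((PySem.List.pyGet? graph x).getD []) y).getD ""
      if cell = "X" ∨ cell = "<" ∨ cell = ">" ∨ cell = "^" ∨ cell = "v" then graph
      else
        let g1 := markSet graph x y
        let g2 := if Direction = "right" then markAux f g1 x (y+1) N M "right" else g1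
        let g3 := if Direction = "left" then markAux f g2 x (y-1) N M "left" else g2
        let g4 := if Direction = "down" then markAux f g3 (x+1) y N M "down" else g3
        let g5 := if Direction = "up" then markAux f g4 (x-1) y N M "up" else g4
        g5

def mark (graph : List (List String)) (x : Int) (y : Int) (N : Int) (M : Int) (Direction : String) : List (List String) :=
  markAux (x.natAbs + y.natAbs + N.natAbs + M.natAbs + 1) graph x y N M Direction

-- ===== PORT B =====
def stepOf (Direction : String) : Option (Int × Int) :=
  PySem.Dict.get? (PySem.Dict.ofList [("right", ((0:Int), (1:Int))), ("left", (0, -1)), ("down", (1, 0)), ("up", (-1, 0))]) Direction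

def markLoop (fuel : Nat) (graph : List (List String)) (x y N M : Int) (step : Option (Int × Int)) : List (List String) :=
  match fuel with
  | 0 => graph
  | Nat.succ f =>
    let cell := (PySem.List.pyGet? ((PySem.List.pyGet? graph x).getD []) y).getD ""
    if 0 ≤ x ∧ x < N ∧ 0 ≤ y ∧ y < M ∧
       ¬ (cell = "X" ∨ cell = "<" ∨ cell = ">" ∨ cell = "^" ∨ cell = "v") then
      let g := markSet graph x y
      match step with
      | none => g
      | some (dx, dy) => markLoop f g (x + dx) (y + dy) N M step
    else graph

def mark_alt (graph : List (List String)) (x : Int) (y : Int) (N : Int) (M : Int) (Direction : String) : List (List String) :=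
  markLoop (x.natAbs + y.natAbs + N.natAbs + M.natAbs + 1) graph x y N M (stepOf Direction)

-- ===== PRECONDITION & SPEC =====
-- Pre_ excludes inputs on which the Python A (and B) raises IndexError because the declared
-- bounds N, M exceed the actual grid size while the start cell lies inside the declared bounds;
-- being closed-form it also excludes some such malformed-bounds inputs on which A happens to
-- stop early (out-of-bounds start or an obstacle before the missing cells) and B agrees.
def Pre_mark (graph : List (List String)) (x : Int) (y : Int) (N : Int) (M : Int) (Direction : String) : Prop :=
  (x < 0 ∨ N ≤ x ∨ y < 0 ∨ M ≤ y) ∨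
  (N ≤ (graph.length : Int) ∧ ∀ row ∈ graph, M ≤ (row.length : Int))
instance (graph : List (List String)) (x : Int) (y : Int) (N : Int) (M : Int) (Direction : String) : Decidable (Pre_mark graph x y N M Direction) := by unfold Pre_mark; infer_instance
def pvWitness_mark : List (List String) × Int × Int × Int × Int × String :=
  ([[".", "."], [".", "X"]], 0, 0, 2, 2, "right")
def Spec_mark (graph : List (List String)) (x : Int) (y : Int) (N : Int) (M : Int) (Direction : String) (out : List (List String)) : Prop := out = mark_alt graph x y N M Direction
instance (graph : List (List String)) (x : Int) (y : Int) (N : Int) (M : Int) (Direction : String) (out : List (List String)) : Decidable (Spec_mark graph x y N M Direction out) := by unfold Spec_mark; infer_instance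

-- ===== CLAIM (what is proved, stated in full; the proofs are below) =====
def Claim_equal_mark : Prop := ∀ (graph : List (List String)) (x : Int) (y : Int) (N : Int) (M : Int) (Direction : String), Dom_mark graph x y N M Direction → Pre_mark graph x y N M Direction → Spec_mark graph x y N M Direction (mark graph x y N M Direction)

-- ===== LEMMAS AND PROOFS =====
-- The two ports agree for EVERY fuel and all inputs (both consume one unit per marked cell).
theorem markAux_eq_markLoop (fuel : Nat) :
    ∀ (graph : List (List String)) (x y N M : Int) (Direction : String),
      markAux fuel graph x y N M Direction = markLoop fuel graph x y N M (stepOf Direction) := by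
  induction fuel with
  | zero => intro graph x y N M Direction; rfl
  | succ f ih =>
    intro graph x y N M Direction
    by_cases hx : x < 0 ∨ N ≤ x
    · simp only [markAux, markLoop, if_pos hx]
      rw [if_neg]; omega
    · by_cases hy : y < 0 ∨ M ≤ y
      · simp only [markAux, markLoop, if_pos hy, if_neg hx]
        rw [if_neg]; omega
      · set cell := (PySem.List.pyGet? ((PySem.List.pyGet? graph x).getD []) y).getD "" with hcell
        by_cases hc : cell = "X" ∨ cell = "<" ∨ cell = ">" ∨ cell = "^" ∨ cell = "v"
        · simp only [markAux, markLoop, if_neg hx, if_neg hy, ← hcell, if_pos hc]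
          rw [if_neg]; intro h; exact h.2.2.2.2 hc
        · have hin : 0 ≤ x ∧ x < N ∧ 0 ≤ y ∧ y < M ∧
              ¬ (cell = "X" ∨ cell = "<" ∨ cell = ">" ∨ cell = "^" ∨ cell = "v") := by
            refine ⟨by omega, by omega, by omega, by omega, hc⟩
          by_cases hr : Direction = "right"
          · subst hr
            simp only [markAux, markLoop, if_neg hx, if_neg hy, ← hcell, if_neg hc, if_pos hin]
            simp only [if_neg (by decide : ¬ ("right" : String) = "left"),
              if_neg (by decide : ¬ ("right" : String) = "down"),
              if_neg (by decide : ¬ ("right" : String) = "up")]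
            have hs : stepOf "right" = some (0, 1) := by decide
            rw [hs, ih, hs]
            simp only [if_true]
            norm_num
          · by_cases hl : Direction = "left"
            · subst hl
              simp only [markAux, markLoop, if_neg hx, if_neg hy, ← hcell, if_neg hc, if_pos hin]
              simp only [if_neg (by decide : ¬ ("left" : String) = "right"),
                if_neg (by decide : ¬ ("left" : String) = "down"),
                if_neg (by decide : ¬ ("left" : String) = "up")]
              have hs : stepOf "left" = some (0, -1) := by decide
              rw [hs, ih, hs]
              simp only [if_true]
              norm_num
              rfl
            · by_cases hd : Direction = "down"
              · subst hd
                simp only [markAux, markLoop, if_neg hx, if_neg hy, ← hcell, if_neg hc, if_pos hin]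
                simp only [if_neg (by decide : ¬ ("down" : String) = "right"),
                  if_neg (by decide : ¬ ("down" : String) = "left"),
                  if_neg (by decide : ¬ ("down" : String) = "up")]
                have hs : stepOf "down" = some (1, 0) := by decide
                rw [hs, ih, hs]
                simp only [if_true]
                norm_num
              · by_cases hu : Direction = "up"
                · subst hu
                  simp only [markAux, markLoop, if_neg hx, if_neg hy, ← hcell, if_neg hc, if_pos hin]
                  simp only [if_neg (by decide : ¬ ("up" : String) = "right"),
                    if_neg (by decide : ¬ ("up" : String) = "left"),
                    if_neg (by decide : ¬ ("up" : String) = "down")]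
                  have hs : stepOf "up" = some (-1, 0) := by decide
                  rw [hs, ih, hs]
                  simp only [if_true]
                  norm_num
                  rfl
                · have hs : stepOf Direction = none := by
                    unfold stepOf
                    rw [PySem.Dict.get?_eq_none_iff_not_mem_keys]
                    have hk : (PySem.Dict.ofList [("right", ((0:Int), (1:Int))), ("left", (0, -1)),
                        ("down", (1, 0)), ("up", (-1, 0))]).keys
                        = ["right", "left", "down", "up"] := by decide
                    simp [hk, hr, hl, hd, hu]
                  simp only [markAux, markLoop, if_neg hx, if_neg hy, ← hcell, if_neg hc,
                    if_pos hin, if_neg hr, if_neg hl, if_neg hd, if_neg hu, hs]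

-- ===== VERDICT (by name: the statement is the Claim_ definition above) =====
theorem mark_spec : Claim_equal_mark := by
  intro graph x y N M Direction _ _
  unfold Spec_mark mark mark_alt
  exact markAux_eq_markLoop _ graph x y N M Direction
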